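-- pv_equiv track=rewrite | github.com/SuperInstance/nexus-runtime | jetson/vision/tests/test_marine_detectors.py | make_red_buoy_image
-- ===== SOURCE A (Python) =====
-- def make_red_buoy_image(w=30, h=30):
--     """Image with a red blob in the centre."""
--     data = [[(100, 100, 100)] * w for _ in range(h)]
--     cx, cy = w // 2, h // 2
--     for y in range(cy - 3, cy + 3):
--         for x in range(cx - 3, cx + 3):
--             if 0 <= y < h and 0 <= x < w:
--                 data[y][x] = (220, 40, 30)
--     return data
-- ===== SOURCE B (Python) =====
-- def make_red_buoy_image(w=30, h=30):
--     """Image with a red blob in the centre."""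
--     cx, cy = w // 2, h // 2
--     return [
--         [
--             (220, 40, 30)
--             if cx - 3 <= x < cx + 3 and cy - 3 <= y < cy + 3
--             else (100, 100, 100)
--             for x in range(w)
--         ]
--         for y in range(h)
--     ]
-- ===== Notes on version B (the rewrite author's own statement) =====
-- stated objective: simpler
-- what changed: Replaces the two-phase fill-then-overwrite (build a gray grid, then a bounds-guarded nested loop repainting the central 6x6 block in place) with a single per-pixel decision pass: one nested comprehension over all coordinates that chooses red or gray directly, with no mutation and no bounds guard.
import Mathlib
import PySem

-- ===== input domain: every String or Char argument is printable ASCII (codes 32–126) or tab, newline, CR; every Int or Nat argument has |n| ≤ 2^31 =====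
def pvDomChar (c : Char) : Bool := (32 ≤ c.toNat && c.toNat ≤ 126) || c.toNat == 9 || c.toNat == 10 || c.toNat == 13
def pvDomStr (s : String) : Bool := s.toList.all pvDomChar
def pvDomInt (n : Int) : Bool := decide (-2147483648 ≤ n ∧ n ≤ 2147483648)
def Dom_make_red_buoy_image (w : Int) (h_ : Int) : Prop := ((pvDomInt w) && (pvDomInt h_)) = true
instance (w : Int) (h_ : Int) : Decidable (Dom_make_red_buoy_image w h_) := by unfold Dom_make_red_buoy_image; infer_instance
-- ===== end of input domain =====

-- B replaces A's fill-then-overwrite mutation with a single per-pixel decision pass (simpler, same O(w*h) cost).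

-- ===== PORT A =====
-- data = [[(100,100,100)] * w for _ in range(h)]; then the nested overwrite loop with bounds guard.
def make_red_buoy_image (w : Int) (h_ : Int) : List (List (Int × Int × Int)) :=
  let data : List (List (Int × Int × Int)) :=
    (PySem.List.pyRange 0 h_ 1).map (fun _ => PySem.List.pyRepeat [((100 : Int), (100 : Int), (100 : Int))] w)
  let cx : Int := PySem.Int.floordiv w 2
  let cy : Int := PySem.Int.floordiv h_ 2
  (PySem.List.pyRange (cy - 3) (cy + 3) 1).foldl (fun d y =>
    (PySem.List.pyRange (cx - 3) (cx + 3) 1).foldl (fun d x =>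
      if 0 ≤ y ∧ y < h_ ∧ 0 ≤ x ∧ x < w then
        d.modify y.toNat (fun row => row.set x.toNat (220, 40, 30))
      else d) d) data

-- ===== PORT B =====
-- one nested comprehension: red iff the pixel lies in the central 6x6 block, gray otherwise.
def make_red_buoy_image_alt (w : Int) (h_ : Int) : List (List (Int × Int × Int)) :=
  let cx : Int := PySem.Int.floordiv w 2
  let cy : Int := PySem.Int.floordiv h_ 2
  (PySem.List.pyRange 0 h_ 1).map (fun y =>
    (PySem.List.pyRange 0 w 1).map (fun x =>
      if cx - 3 ≤ x ∧ x < cx + 3 ∧ cy - 3 ≤ y ∧ y < cy + 3 then ((220 : Int), (40 : Int), (30 : Int))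
      else ((100 : Int), (100 : Int), (100 : Int))))

-- ===== PRECONDITION & SPEC =====
def Spec_make_red_buoy_image (w : Int) (h_ : Int) (out : List (List (Int × Int × Int))) : Prop := out = make_red_buoy_image_alt w h_
instance (w : Int) (h_ : Int) (out : List (List (Int × Int × Int))) : Decidable (Spec_make_red_buoy_image w h_ out) := by unfold Spec_make_red_buoy_image; infer_instance

-- ===== CLAIM (what is proved, stated in full; the proofs are below) =====
def Claim_equal_make_red_buoy_image : Prop := ∀ (w : Int) (h_ : Int), Dom_make_red_buoy_image w h_ → Spec_make_red_buoy_image w h_ (make_red_buoy_image w h_)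

-- ===== LEMMAS AND PROOFS =====

-- the inner x-loop of A, acting on a single row: pixel j becomes red iff j ∈ xs (and in range)
theorem pvSetFold_get? {P : Type} (w : Int) (v : P) (xs : List Int) :
    ∀ (r : List P) (j : Nat), r.length = w.toNat →
      (xs.foldl (fun r x => if 0 ≤ x ∧ x < w then r.set x.toNat v else r) r)[j]? =
        if (j : Int) ∈ xs ∧ (j : Int) < w then some v else r[j]? := by
  induction xs with
  | nil => intro r j _; simp
  | cons x xs ih =>
    intro r j hlen
    by_cases hx : 0 ≤ x ∧ x < w
    · have hlen' : (r.set x.toNat v).length = w.toNat := by simp [hlen]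
      rw [List.foldl_cons, if_pos hx, ih _ j hlen']
      by_cases hj : (j : Int) ∈ xs ∧ (j : Int) < w
      · simp [hj.1, hj.2]
      · rw [if_neg hj, List.getElem?_set]
        by_cases hxj : x.toNat = j
        · have hx' : x = (j : Int) := by omega
          have hjw : (j : Int) < w := by omega
          have hjr : j < r.length := by omega
          simp [hjr, hx', hjw]
        · have hx' : x ≠ (j : Int) := by omega
          have hcnot : ¬((j : Int) ∈ x :: xs ∧ (j : Int) < w) := by
            rintro ⟨hm, hw2⟩
            rcases List.mem_cons.mp hm with h | h
            · exact hx' h.symm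
            · exact hj ⟨h, hw2⟩
          rw [if_neg hcnot, if_neg hxj]
    · rw [List.foldl_cons, if_neg hx, ih _ j hlen]
      by_cases hj : (j : Int) ∈ xs ∧ (j : Int) < w
      · simp [hj.1, hj.2]
      · have hcnot : ¬((j : Int) ∈ x :: xs ∧ (j : Int) < w) := by
          rintro ⟨hm, hw2⟩
          rcases List.mem_cons.mp hm with h | h
          · exact hx ⟨by omega, by omega⟩
          · exact hj ⟨h, hw2⟩
        rw [if_neg hj, if_neg hcnot]

-- A's inner x-loop on the 2D grid is one guarded modify of row y
theorem pvInnerCollapse {P : Type} (h_ w : Int) (v : P) (y : Int) (xs : List Int) :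
    ∀ (d : List (List P)),
      (xs.foldl (fun d x => if 0 ≤ y ∧ y < h_ ∧ 0 ≤ x ∧ x < w then
          d.modify y.toNat (fun row => row.set x.toNat v) else d) d) =
        if 0 ≤ y ∧ y < h_ then
          d.modify y.toNat (fun row => xs.foldl (fun r x => if 0 ≤ x ∧ x < w then r.set x.toNat v else r) row)
        else d := by
  by_cases hy : 0 ≤ y ∧ y < h_
  · induction xs with
    | nil =>
      intro d
      rw [if_pos hy]
      refine List.ext_getElem? fun i => ?_
      simp [List.getElem?_modify]
    | cons x xs ih =>
      intro d
      by_cases hx : 0 ≤ x ∧ x < w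
      · rw [List.foldl_cons, if_pos ⟨hy.1, hy.2, hx.1, hx.2⟩, ih, if_pos hy, if_pos hy]
        refine List.ext_getElem? fun i => ?_
        simp only [List.getElem?_modify, List.foldl_cons, if_pos hx]
        cases d[i]? <;> simp <;> split <;> simp
      · rw [List.foldl_cons]
        have : ¬(0 ≤ y ∧ y < h_ ∧ 0 ≤ x ∧ x < w) := by tauto
        rw [if_neg this, ih, if_pos hy, if_pos hy]
        simp [List.foldl_cons, if_neg hx]
  · induction xs with
    | nil => intro d; rw [if_neg hy]; rfl
    | cons x xs ih =>
      intro d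
      have hg : ¬(0 ≤ y ∧ y < h_ ∧ 0 ≤ x ∧ x < w) := by tauto
      rw [List.foldl_cons, if_neg hg, ih, if_neg hy, if_neg hy]

-- A's outer y-loop: row i gets the inner update applied iff i ∈ ys (nodup) and i < h_
theorem pvOuterFold_get? {P : Type} (h_ : Int) (g : Int → List P → List P) (ys : List Int) (hnd : ys.Nodup) :
    ∀ (d : List (List P)) (i : Nat),
      (ys.foldl (fun d y => if 0 ≤ y ∧ y < h_ then d.modify y.toNat (g y) else d) d)[i]? =
        if (i : Int) ∈ ys ∧ (i : Int) < h_ then d[i]?.map (g i) else d[i]? := by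
  induction ys with
  | nil => intro d i; simp
  | cons y ys ih =>
    intro d i
    have hy_notin : y ∉ ys := (List.nodup_cons.mp hnd).1
    have hnd' : ys.Nodup := (List.nodup_cons.mp hnd).2
    rw [List.foldl_cons, ih hnd']
    by_cases hyi : y = (i : Int)
    · have hinot : ¬((i : Int) ∈ ys ∧ (i : Int) < h_) := by
        rintro ⟨hm, _⟩; exact hy_notin (hyi ▸ hm)
      by_cases hh : (i : Int) < h_
      · have hguard : 0 ≤ y ∧ y < h_ := by omega
        rw [if_pos hguard, if_neg hinot]
        have ht : y.toNat = i := by omega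
        have hcond : ((i : Int) ∈ y :: ys ∧ (i : Int) < h_) := ⟨by simp [hyi], hh⟩
        rw [if_pos hcond, List.getElem?_modify]
        cases d[i]? <;> simp [hyi]
      · have hguard : ¬(0 ≤ y ∧ y < h_) := by omega
        rw [if_neg hguard, if_neg hinot, if_neg (by rintro ⟨_, hw2⟩; exact hh hw2)]
    · by_cases hyg : 0 ≤ y ∧ y < h_
      · rw [if_pos hyg]
        have hne : y.toNat ≠ i := by omega
        have hsame : (d.modify y.toNat (g y))[i]? = d[i]? := by
          rw [List.getElem?_modify]; cases d[i]? <;> simp [hne]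
        rw [hsame]
        by_cases hc : (i : Int) ∈ ys ∧ (i : Int) < h_
        · rw [if_pos hc, if_pos ⟨List.mem_cons_of_mem _ hc.1, hc.2⟩]
        · rw [if_neg hc, if_neg (by
            rintro ⟨hm, hw2⟩
            rcases List.mem_cons.mp hm with h | h
            · exact hyi h.symm
            · exact hc ⟨h, hw2⟩)]
      · rw [if_neg hyg]
        by_cases hc : (i : Int) ∈ ys ∧ (i : Int) < h_
        · rw [if_pos hc, if_pos ⟨List.mem_cons_of_mem _ hc.1, hc.2⟩]
        · rw [if_neg hc, if_neg (by
            rintro ⟨hm, hw2⟩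
            rcases List.mem_cons.mp hm with h | h
            · exact hyi h.symm
            · exact hc ⟨h, hw2⟩)]

-- indexing a comprehension over range(n)
theorem pvRangeMap_get? {A : Type} (f : Int → A) (n : Int) (j : Nat) :
    ((PySem.List.pyRange 0 n 1).map f)[j]? = if (j : Int) < n then some (f j) else none := by
  rw [PySem.List.pyRange_one]
  by_cases hj : j < (n - 0).toNat
  · rw [List.getElem?_map, List.getElem?_map, List.getElem?_range hj]
    simp only [Option.map_some, zero_add]
    rw [if_pos (by omega)]
  · rw [List.getElem?_map, List.getElem?_map, List.getElem?_eq_none (by simp; omega)]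
    simp only [Option.map_none]
    rw [if_neg (by omega)]

-- ===== VERDICT (by name: the statement is the Claim_ definition above) =====
theorem make_red_buoy_image_spec : Claim_equal_make_red_buoy_image := by
  intro w h_ _
  unfold Spec_make_red_buoy_image make_red_buoy_image make_red_buoy_image_alt
  set cx := PySem.Int.floordiv w 2 with hcx
  set cy := PySem.Int.floordiv h_ 2 with hcy
  simp only [pvInnerCollapse h_ w ((220 : Int), (40 : Int), (30 : Int))]
  refine List.ext_getElem? fun i => ?_
  rw [pvOuterFold_get? h_ _ _ (PySem.List.nodup_pyRange_one _ _), pvRangeMap_get?, pvRangeMap_get?]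
  by_cases hih : (i : Int) < h_
  · rw [if_pos hih, if_pos hih]
    have hrep := PySem.List.pyRepeat_singleton ((100 : Int), (100 : Int), (100 : Int)) w
    by_cases hrc : (i : Int) ∈ PySem.List.pyRange (cy - 3) (cy + 3) 1
    · have hmem := PySem.List.mem_pyRange_one.mp hrc
      rw [if_pos ⟨hrc, hih⟩]
      simp only [Option.map_some, Option.some_inj]
      refine List.ext_getElem? fun j => ?_
      rw [pvSetFold_get? w _ _ _ j (by simp [hrep]), pvRangeMap_get?]
      by_cases hjw : (j : Int) < w
      · rw [if_pos hjw]
        by_cases hjc : (j : Int) ∈ PySem.List.pyRange (cx - 3) (cx + 3) 1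
        · have hjm := PySem.List.mem_pyRange_one.mp hjc
          rw [if_pos ⟨hjc, hjw⟩, if_pos ⟨by omega, by omega, by omega, by omega⟩]
        · have hjnot := fun h => hjc (PySem.List.mem_pyRange_one.mpr h)
          rw [if_neg (by tauto), hrep, List.getElem?_replicate, if_pos (by omega),
            if_neg (by intro hc; exact hjnot ⟨by omega, by omega⟩)]
      · rw [if_neg (by tauto), hrep, List.getElem?_replicate, if_neg (by omega), if_neg (by omega)]
    · have hrnot := fun h => hrc (PySem.List.mem_pyRange_one.mpr h)
      rw [if_neg (by tauto)]
      simp only [Option.some_inj]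
      refine List.ext_getElem? fun j => ?_
      rw [hrep, List.getElem?_replicate, pvRangeMap_get?]
      by_cases hjw : (j : Int) < w
      · rw [if_pos (by omega), if_pos hjw,
          if_neg (by intro hc; exact hrnot ⟨by omega, by omega⟩)]
      · rw [if_neg (by omega), if_neg (by omega)]
  · rw [if_neg hih, if_neg hih, if_neg (by rintro ⟨_, hw2⟩; omega)]
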